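-- pv_equiv track=rewrite | github.com/PetrMarketing/davinci-autoeditor | core/fragment_cutter.py | clean_to_original
-- ===== SOURCE A (Python) =====
-- def clean_to_original(t_clean_ms, keep_segments):
--     """
--     Маппинг времени с чистого таймлайна (без тишины) на оригинальное видео.
--
--     Args:
--         t_clean_ms: Позиция на чистом таймлайне (мс).
--         keep_segments: Список (start_ms, end_ms) сегментов тишины.
--
--     Returns:
--         Позиция в оригинальном видео (мс).
--     """
--     elapsed = 0
--     for seg_start, seg_end in keep_segments:
--         seg_dur = seg_end - seg_start
--         if elapsed + seg_dur >= t_clean_ms: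
--             return seg_start + (t_clean_ms - elapsed)
--         elapsed += seg_dur
--     # За пределами — конец последнего сегмента
--     if keep_segments:
--         return keep_segments[-1][1]
--     return t_clean_ms
-- ===== SOURCE B (Python) =====
-- def clean_to_original(t_clean_ms, keep_segments):
--     """Map a clean-timeline position to original video time.
--
--     Precompute, per segment, the offset between original time and clean time
--     together with the cumulative kept duration, then look up the first segment
--     whose cumulative duration covers t_clean_ms."""
--     table = []
--     total = 0
--     for s, e in keep_segments:
--         table.append((s - total, total + (e - s)))
--         total += e - s
--     for offset, bound in table:
--         if bound >= t_clean_ms: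
--             return offset + t_clean_ms
--     return keep_segments[-1][1] if keep_segments else t_clean_ms
-- ===== Notes on version B (the rewrite author's own statement) =====
-- stated objective: alternative
-- what changed: Replaced the fused accumulate-and-compare scan with a precomputed table of (original-time offset, cumulative kept duration) pairs followed by a first-match lookup over that table.
import Mathlib
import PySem

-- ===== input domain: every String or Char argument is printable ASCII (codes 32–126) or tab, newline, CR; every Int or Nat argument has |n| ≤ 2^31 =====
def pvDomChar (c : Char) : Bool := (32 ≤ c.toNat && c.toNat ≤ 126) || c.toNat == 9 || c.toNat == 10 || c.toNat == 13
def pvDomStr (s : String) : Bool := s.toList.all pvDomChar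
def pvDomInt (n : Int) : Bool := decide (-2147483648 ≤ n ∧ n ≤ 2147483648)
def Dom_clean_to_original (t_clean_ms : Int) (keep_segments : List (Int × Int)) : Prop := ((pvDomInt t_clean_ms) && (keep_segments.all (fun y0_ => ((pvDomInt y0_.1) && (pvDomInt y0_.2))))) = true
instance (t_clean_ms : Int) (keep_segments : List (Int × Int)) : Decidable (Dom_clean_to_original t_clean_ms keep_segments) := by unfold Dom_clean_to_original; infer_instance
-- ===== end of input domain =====

-- B replaces A's fused accumulate-and-compare scan by a precomputed table of
-- (original-time offset, cumulative kept duration) pairs plus a first-match lookup.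

-- ===== PORT A =====
-- A's for-loop with early return: returns some r when the loop returns, none when it falls through.
def cleanLoopA (t : Int) : Int → List (Int × Int) → Option Int
  | _, [] => none
  | elapsed, (s, e) :: rest =>
    let segDur := e - s
    if elapsed + segDur ≥ t then some (s + (t - elapsed))
    else cleanLoopA t (elapsed + segDur) rest

def clean_to_original (t_clean_ms : Int) (keep_segments : List (Int × Int)) : Int :=
  match cleanLoopA t_clean_ms 0 keep_segments with
  | some r => r
  | none =>
    -- keep_segments[-1][1] on a nonempty list = last element's second component
    match keep_segments.getLast? with
    | some p => p.2
    | none => t_clean_ms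

-- ===== PORT B =====
-- the `table` list of (offset, bound) pairs (`total` starts at 0)
def tableB : Int → List (Int × Int) → List (Int × Int)
  | _, [] => []
  | total, (s, e) :: rest => (s - total, total + (e - s)) :: tableB (total + (e - s)) rest

-- the lookup loop with early return: first entry whose bound covers t
def lookupB (t : Int) : List (Int × Int) → Option Int
  | [] => none
  | (offset, bound) :: rest => if bound ≥ t then some (offset + t) else lookupB t rest

def clean_to_original_alt (t_clean_ms : Int) (keep_segments : List (Int × Int)) : Int :=
  match lookupB t_clean_ms (tableB 0 keep_segments) with
  | some r => r
  | none =>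
    match keep_segments.getLast? with
    | some p => p.2
    | none => t_clean_ms

-- ===== PRECONDITION & SPEC =====
def Spec_clean_to_original (t_clean_ms : Int) (keep_segments : List (Int × Int)) (out : Int) : Prop := out = clean_to_original_alt t_clean_ms keep_segments
instance (t_clean_ms : Int) (keep_segments : List (Int × Int)) (out : Int) : Decidable (Spec_clean_to_original t_clean_ms keep_segments out) := by unfold Spec_clean_to_original; infer_instance

-- ===== CLAIM (what is proved, stated in full; the proofs are below) =====
def Claim_equal_clean_to_original : Prop := ∀ (t_clean_ms : Int) (keep_segments : List (Int × Int)), Dom_clean_to_original t_clean_ms keep_segments → Spec_clean_to_original t_clean_ms keep_segments (clean_to_original t_clean_ms keep_segments)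

-- ===== LEMMAS AND PROOFS =====

-- A's loop and B's table-plus-lookup agree for every starting accumulator
theorem loop_eq_lookup (t : Int) : ∀ (segs : List (Int × Int)) (acc : Int),
    cleanLoopA t acc segs = lookupB t (tableB acc segs) := by
  intro segs
  induction segs with
  | nil => intro acc; simp [cleanLoopA, tableB, lookupB]
  | cons hd tl ih =>
    intro acc
    obtain ⟨s, e⟩ := hd
    simp only [cleanLoopA, tableB, lookupB]
    by_cases h : acc + (e - s) ≥ t
    · rw [if_pos h, if_pos h]
      congr 1
      ring
    · rw [if_neg h, if_neg h]
      exact ih (acc + (e - s))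

-- ===== VERDICT (by name: the statement is the Claim_ definition above) =====
theorem clean_to_original_spec : Claim_equal_clean_to_original := by
  intro t segs _
  unfold Spec_clean_to_original clean_to_original clean_to_original_alt
  rw [loop_eq_lookup]
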